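-- pv_equiv track=rewrite | github.com/Kellthuzad/Advent2020 | Day17/Solution.py | setBounds
-- ===== SOURCE A (Python) =====
-- def setBounds(cube_state):
--     z_min = 0
--     z_max = 0
--     y_min = 0
--     y_max = 0
--     x_min = 0
--     x_max = 0
--     h_min = 0
--     h_max = 0
--
--     for item in cube_state:
--         if(item[0] >= x_max):
--             x_max = item[0] + 1
--         if item[0] <= x_min:
--             x_min = item[0] - 1
--
--         if(item[1] >= y_max):
--             y_max = item[1] +1
--         if item[1] <= y_min:
--             y_min = item[1] -1
--
--         if(item[2] >= z_max):
--             z_max = item[2] +1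
--         if item[2] <= z_min:
--             z_min = item[2] -1
--
--         if(item[3] >= h_max):
--             h_max = item[3] +1
--         if item[3] <= h_min:
--             h_min = item[3] -1
--
--     return((x_min,x_max), (y_min, y_max), (z_min,z_max), (h_min, h_max))
-- ===== SOURCE B (Python) =====
-- def setBounds(cube_state):
--     if not cube_state:
--         return ((0, 0), (0, 0), (0, 0), (0, 0))
--     bounds = []
--     for i in range(4):
--         M = max(item[i] for item in cube_state)
--         m = min(item[i] for item in cube_state)
--         bounds.append((min(0, m - 1), max(0, M + 1)))
--     return tuple(bounds)
-- ===== Notes on version B (the rewrite author's own statement) =====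
-- stated objective: simpler
-- what changed: Replaces the fused 8-variable conditional update loop with per-axis builtin max/min extraction followed by a closed-form clamp (min(0,m-1), max(0,M+1)), with an explicit empty case.
import Mathlib
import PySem

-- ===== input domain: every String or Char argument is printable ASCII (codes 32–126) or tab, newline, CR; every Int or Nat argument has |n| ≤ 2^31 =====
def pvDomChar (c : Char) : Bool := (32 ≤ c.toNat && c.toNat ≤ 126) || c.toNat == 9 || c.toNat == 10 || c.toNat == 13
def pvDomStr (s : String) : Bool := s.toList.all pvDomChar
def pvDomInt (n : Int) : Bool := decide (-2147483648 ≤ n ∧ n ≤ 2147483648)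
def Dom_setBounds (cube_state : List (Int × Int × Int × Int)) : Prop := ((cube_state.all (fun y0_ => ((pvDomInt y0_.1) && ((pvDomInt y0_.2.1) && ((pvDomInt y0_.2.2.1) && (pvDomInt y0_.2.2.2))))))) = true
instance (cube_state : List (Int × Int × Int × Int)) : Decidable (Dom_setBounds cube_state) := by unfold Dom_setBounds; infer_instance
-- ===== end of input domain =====

-- B replaces the fused 8-variable conditional loop with per-axis max/min extraction plus a closed-form clamp (simpler decomposition, same O(n) cost).
-- ===== PORT A =====
def setBoundsLoop (z_min z_max y_min y_max x_min x_max h_min h_max : Int) :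
    List (Int × Int × Int × Int) → (Int × Int) × (Int × Int) × (Int × Int) × (Int × Int)
  | [] => ((x_min, x_max), (y_min, y_max), (z_min, z_max), (h_min, h_max))
  | item :: rest =>
    let x_max := if item.1 ≥ x_max then item.1 + 1 else x_max
    let x_min := if item.1 ≤ x_min then item.1 - 1 else x_min
    let y_max := if item.2.1 ≥ y_max then item.2.1 + 1 else y_max
    let y_min := if item.2.1 ≤ y_min then item.2.1 - 1 else y_min
    let z_max := if item.2.2.1 ≥ z_max then item.2.2.1 + 1 else z_max
    let z_min := if item.2.2.1 ≤ z_min then item.2.2.1 - 1 else z_min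
    let h_max := if item.2.2.2 ≥ h_max then item.2.2.2 + 1 else h_max
    let h_min := if item.2.2.2 ≤ h_min then item.2.2.2 - 1 else h_min
    setBoundsLoop z_min z_max y_min y_max x_min x_max h_min h_max rest

def setBounds (cube_state : List (Int × Int × Int × Int)) : (Int × Int) × (Int × Int) × (Int × Int) × (Int × Int) :=
  setBoundsLoop 0 0 0 0 0 0 0 0 cube_state

-- ===== PORT B =====
-- B: per-axis extrema (Python max()/min() on a nonempty list; getD 0 is never the raising case here) then a closed-form clamp.
def pvAxisBound (vals : List Int) : Int × Int :=
  let M := (PySem.List.max? vals (fun y => y)).getD 0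
  let m := (PySem.List.min? vals (fun y => y)).getD 0
  (min 0 (m - 1), max 0 (M + 1))

def setBounds_alt (cube_state : List (Int × Int × Int × Int)) : (Int × Int) × (Int × Int) × (Int × Int) × (Int × Int) :=
  match cube_state with
  | [] => ((0, 0), (0, 0), (0, 0), (0, 0))
  | _ =>
    (pvAxisBound (cube_state.map (·.1)),
     pvAxisBound (cube_state.map (·.2.1)),
     pvAxisBound (cube_state.map (·.2.2.1)),
     pvAxisBound (cube_state.map (·.2.2.2)))

-- ===== PRECONDITION & SPEC =====
def Spec_setBounds (cube_state : List (Int × Int × Int × Int)) (out : (Int × Int) × (Int × Int) × (Int × Int) × (Int × Int)) : Prop := out = setBounds_alt cube_state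
instance (cube_state : List (Int × Int × Int × Int)) (out : (Int × Int) × (Int × Int) × (Int × Int) × (Int × Int)) : Decidable (Spec_setBounds cube_state out) := by unfold Spec_setBounds; infer_instance

-- ===== CLAIM (what is proved, stated in full; the proofs are below) =====
def Claim_equal_setBounds : Prop := ∀ (cube_state : List (Int × Int × Int × Int)), Dom_setBounds cube_state → Spec_setBounds cube_state (setBounds cube_state)

-- ===== LEMMAS AND PROOFS =====
def pvHi (a : Int) (xs : List Int) : Int := xs.foldl (fun M v => if v ≥ M then v + 1 else M) a
def pvLo (a : Int) (xs : List Int) : Int := xs.foldl (fun m v => if v ≤ m then v - 1 else m) a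

theorem setBoundsLoop_eq (l : List (Int × Int × Int × Int)) :
    ∀ zm zM ym yM xm xM hm hM, setBoundsLoop zm zM ym yM xm xM hm hM l =
      ((pvLo xm (l.map (·.1)), pvHi xM (l.map (·.1))),
       (pvLo ym (l.map (·.2.1)), pvHi yM (l.map (·.2.1))),
       (pvLo zm (l.map (·.2.2.1)), pvHi zM (l.map (·.2.2.1))),
       (pvLo hm (l.map (·.2.2.2)), pvHi hM (l.map (·.2.2.2)))) := by
  induction l with
  | nil => intros; rfl
  | cons it rest ih => intros; simp only [setBoundsLoop, List.map, pvLo, pvHi, List.foldl]; exact ih _ _ _ _ _ _ _ _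

theorem pvHi_inv (xs : List Int) : ∀ P, pvHi (max 0 (P + 1)) xs = max 0 (xs.foldl max P + 1) := by
  induction xs with
  | nil => intro P; rfl
  | cons v t ih =>
    intro P
    have hstep : (if v ≥ max 0 (P + 1) then v + 1 else max 0 (P + 1)) = max 0 (max P v + 1) := by
      split <;> omega
    simp only [pvHi, List.foldl] at ih ⊢
    rw [hstep]; exact ih (max P v)

theorem pvLo_inv (xs : List Int) : ∀ P, pvLo (min 0 (P - 1)) xs = min 0 (xs.foldl min P - 1) := by
  induction xs with
  | nil => intro P; rfl
  | cons v t ih =>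
    intro P
    have hstep : (if v ≤ min 0 (P - 1) then v - 1 else min 0 (P - 1)) = min 0 (min P v - 1) := by
      split <;> omega
    simp only [pvLo, List.foldl] at ih ⊢
    rw [hstep]; exact ih (min P v)

theorem pvAxis_eq (v : Int) (t : List Int) :
    (pvLo 0 (v :: t), pvHi 0 (v :: t)) = pvAxisBound (v :: t) := by
  have h1 : pvHi 0 (v :: t) = max 0 (t.foldl max v + 1) := by
    simp only [pvHi, List.foldl]
    have : (if v ≥ 0 then v + 1 else 0) = max 0 (v + 1) := by split <;> omega
    rw [this]; exact pvHi_inv t v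
  have h2 : pvLo 0 (v :: t) = min 0 (t.foldl min v - 1) := by
    simp only [pvLo, List.foldl]
    have : (if v ≤ 0 then v - 1 else 0) = min 0 (v - 1) := by split <;> omega
    rw [this]; exact pvLo_inv t v
  simp [pvAxisBound, PySem.List.max?_id_cons, PySem.List.min?_id_cons, h1, h2]


-- ===== VERDICT (by name: the statement is the Claim_ definition above) =====
theorem setBounds_spec : Claim_equal_setBounds := by
  intro cs _
  unfold Spec_setBounds setBounds
  cases cs with
  | nil => rfl
  | cons c rest =>
    rw [setBoundsLoop_eq]
    simp only [setBounds_alt, List.map]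
    rw [pvAxis_eq, pvAxis_eq, pvAxis_eq, pvAxis_eq]
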